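-- pv_equiv track=rewrite | github.com/ohmaha40/Advent_of_Code_2024 | 1.py | solvep2
-- ===== SOURCE A (Python) =====
-- def solvep2(p):
--     liste1, liste2 = [] , []
--     part2 = 0
--     for zahl1 in p:
--         liste1.append(zahl1[0])
--         liste2.append(zahl1[1])
--     for i in liste1:
--         z=0
--         for a in liste2:
--             if int(a) == int(i):
--                 z += 1
--         part2 += (int(i)*z)
--     return part2
-- ===== SOURCE B (Python) =====
-- def solvep2(p):
--     c1 = {}
--     c2 = {}
--     for pair in p:
--         x = int(pair[0])
--         y = int(pair[1])
--         c1[x] = c1.get(x, 0) + 1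
--         c2[y] = c2.get(y, 0) + 1
--     return sum(v * n * c2.get(v, 0) for v, n in c1.items())
-- ===== Notes on version B (the rewrite author's own statement) =====
-- stated objective: faster
-- what changed: Replaced A's per-element inner scan of the second column by two frequency dictionaries built in one pass, then a single sum over the distinct keys of the first counter (v * count1[v] * count2[v]).
import Mathlib
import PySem

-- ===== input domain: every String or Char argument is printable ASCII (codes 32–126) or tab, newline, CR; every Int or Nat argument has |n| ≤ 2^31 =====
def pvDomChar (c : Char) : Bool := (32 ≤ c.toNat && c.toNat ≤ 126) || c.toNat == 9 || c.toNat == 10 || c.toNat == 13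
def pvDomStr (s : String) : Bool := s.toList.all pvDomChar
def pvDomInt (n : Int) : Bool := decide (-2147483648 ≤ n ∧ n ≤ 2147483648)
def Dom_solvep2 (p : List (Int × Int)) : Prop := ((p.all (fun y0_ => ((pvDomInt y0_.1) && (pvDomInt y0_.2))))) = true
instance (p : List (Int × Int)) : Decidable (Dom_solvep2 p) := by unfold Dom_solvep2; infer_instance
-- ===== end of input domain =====

-- B replaces A's O(n^2) per-element scan of the second column by two frequency dictionaries
-- built in one pass, then one sum over the distinct keys of the first counter.

-- ===== PORT A =====
def solvep2 (p : List (Int × Int)) : Int :=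
  -- liste1, liste2 built by the first loop; part2 by the nested loops
  let ls := p.foldl
    (fun (ls : List Int × List Int) zahl1 => (ls.1 ++ [zahl1.1], ls.2 ++ [zahl1.2])) ([], [])
  ls.1.foldl
    (fun part2 i =>
      part2 + i * (ls.2.foldl (fun z a => if a == i then z + 1 else z) 0)) 0

-- ===== PORT B =====
def solvep2_alt (p : List (Int × Int)) : Int :=
  -- one pass building both counters c1, c2; then sum over c1's items
  let cs := p.foldl
    (fun (cs : PySem.Dict Int Int × PySem.Dict Int Int) pair =>
      (cs.1.insert pair.1 (cs.1.getD pair.1 0 + 1),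
       cs.2.insert pair.2 (cs.2.getD pair.2 0 + 1)))
    (PySem.Dict.empty, PySem.Dict.empty)
  (cs.1.items.map (fun vn => vn.1 * vn.2 * cs.2.getD vn.1 0)).sum

-- ===== PRECONDITION & SPEC =====
def Spec_solvep2 (p : List (Int × Int)) (out : Int) : Prop := out = solvep2_alt p
instance (p : List (Int × Int)) (out : Int) : Decidable (Spec_solvep2 p out) := by unfold Spec_solvep2; infer_instance

-- ===== CLAIM (what is proved, stated in full; the proofs are below) =====
def Claim_equal_solvep2 : Prop := ∀ (p : List (Int × Int)), Dom_solvep2 p → Spec_solvep2 p (solvep2 p)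

-- ===== LEMMAS AND PROOFS =====

-- A's inner loop over liste2 counts the occurrences of i
theorem pv_inner_count (l2 : List Int) (i : Int) :
    (l2.foldl (fun z a => if a == i then z + 1 else z) 0) = (l2.count i : Int) := by
  simp only [pysem, List.count_eq_countP, List.countP_eq_length_filter]
  norm_cast; omega

-- grouping: a per-element sum equals the count-weighted sum over the distinct elements
theorem pv_group_sum (L : List Int) (f : Int → Int) :
    (L.map f).sum = ((PySem.List.dedup L).map (fun v => (L.count v : Int) * f v)).sum := by
  have hnd : (PySem.List.dedup L).Nodup := PySem.List.nodup_dedup L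
  have htf : (PySem.List.dedup L).toFinset = L.toFinset := by ext x; simp
  rw [Finset.sum_list_map_count, ← List.sum_toFinset _ hnd, htf]
  exact Finset.sum_congr rfl (fun m _ => by simp)

theorem solvep2_eq_alt (p : List (Int × Int)) : solvep2 p = solvep2_alt p := by
  unfold solvep2 solvep2_alt
  rw [PySem.List.foldl_prod_mk
        (f := fun (l : List Int) (z : Int × Int) => l ++ [z.1])
        (g := fun (l : List Int) (z : Int × Int) => l ++ [z.2]),
      PySem.List.foldl_prod_mk
        (f := fun (d : PySem.Dict Int Int) (z : Int × Int) => d.insert z.1 (d.getD z.1 0 + 1))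
        (g := fun (d : PySem.Dict Int Int) (z : Int × Int) => d.insert z.2 (d.getD z.2 0 + 1))]
  simp only [PySem.List.foldl_append_singleton_eq_map]
  rw [← List.foldl_map (f := Prod.fst)
        (g := fun (d : PySem.Dict Int Int) (x : Int) => d.insert x (d.getD x 0 + 1)),
      ← List.foldl_map (f := Prod.snd)
        (g := fun (d : PySem.Dict Int Int) (x : Int) => d.insert x (d.getD x 0 + 1)),
      PySem.Dict.foldl_insert_getD_add_one_eq_counter,
      PySem.Dict.foldl_insert_getD_add_one_eq_counter]
  set L1 := p.map Prod.fst
  set L2 := p.map Prod.snd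
  simp only [List.nil_append, pv_inner_count]
  rw [PySem.List.foldl_add (g := fun i => i * (L2.count i : Int))]
  simp only [PySem.Dict.items_counter, PySem.Dict.getD_counter, List.map_map,
    ← PySem.List.dedup_eq_ofList, zero_add]
  rw [pv_group_sum L1 (fun i => i * (L2.count i : Int))]
  congr 1
  apply List.map_congr_left
  intro v _
  simp [Function.comp]
  ring

-- ===== VERDICT (by name: the statement is the Claim_ definition above) =====
theorem solvep2_spec : Claim_equal_solvep2 := by
  intro p _
  exact solvep2_eq_alt p
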